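-- pv_equiv track=rewrite | github.com/Mullangisushma/practice-questions | Maximum Exponent.py | MaximumExpo
-- ===== SOURCE A (Python) =====
-- def CountExpo(i):
--     count=0
--     while(i!=0 and i%2==0):
--         count+=1
--         i=i//2
--     return count
--
-- def MaximumExpo(a,b):
--     max=0
--     number=0
--     for i in range(a,b+1):
--         temp=CountExpo(i)
--         if(temp>max):
--             max=temp
--             number=i
--     return number
-- ===== SOURCE B (Python) =====
-- def MaximumExpo(a, b):
--     kmax = max(abs(a), abs(b)).bit_length()
--     for k in range(kmax, 0, -1):
--         p = 2 ** k
--         m = -((-a) // p) * p      # smallest multiple of p that is >= a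
--         if m == 0:
--             m = p                 # smallest NONZERO multiple of p that is >= a
--         if m <= b:
--             return m
--     return 0
-- ===== Notes on version B (the rewrite author's own statement) =====
-- stated objective: faster
-- what changed: Instead of scanning every integer in [a,b] and counting its factors of two, B searches exponents k downward from max(|a|,|b|).bit_length() and returns the smallest nonzero multiple of 2**k lying in [a,b] (computed by one ceiling division), 0 if none exists.
import Mathlib
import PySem

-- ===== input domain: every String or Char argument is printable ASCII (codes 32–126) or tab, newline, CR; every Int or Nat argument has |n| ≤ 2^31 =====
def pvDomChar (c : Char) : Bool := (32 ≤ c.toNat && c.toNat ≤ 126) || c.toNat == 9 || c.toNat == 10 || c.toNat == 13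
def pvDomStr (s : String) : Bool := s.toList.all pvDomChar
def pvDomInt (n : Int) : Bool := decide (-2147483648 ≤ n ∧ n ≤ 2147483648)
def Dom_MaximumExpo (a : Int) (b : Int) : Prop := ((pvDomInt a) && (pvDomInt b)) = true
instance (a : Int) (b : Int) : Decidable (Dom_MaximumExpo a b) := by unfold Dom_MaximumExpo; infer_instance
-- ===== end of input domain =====

-- B replaces A's linear scan of [a,b] with a downward search over exponents k,
-- returning the smallest nonzero multiple of 2^k in [a,b] for the largest k that has one (objective: faster).


-- ===== PORT A =====
-- while(i!=0 and i%2==0): count+=1; i=i//2  — as structural recursion on |i|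
def countExpo (i : Int) : Int :=
  if h : i ≠ 0 ∧ PySem.Int.mod i 2 = 0 then 1 + countExpo (PySem.Int.floordiv i 2) else 0
termination_by i.natAbs
decreasing_by
  simp only [PySem.Int.floordiv_eq_ediv_of_pos (by norm_num : (0:Int) < 2)]
  have h1 := h.1
  have h2 := h.2
  rw [PySem.Int.mod_eq_emod_of_pos (by norm_num : (0:Int) < 2)] at h2
  omega

def MaximumExpo (a : Int) (b : Int) : Int :=
  ((PySem.List.pyRange a (b+1) 1).foldl
    (fun (st : Int × Int) i =>
      let temp := countExpo i
      if temp > st.1 then (temp, i) else st) ((0:Int), (0:Int))).2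

-- ===== PORT B =====
-- for k in range(kmax, 0, -1): … return m   — as recursion counting k down
def pvLoop (a b : Int) : Nat → Int
  | 0 => 0
  | (k+1) =>
    let p : Int := 2 ^ (k+1)
    let m0 := -(PySem.Int.floordiv (-a) p) * p
    let m := if m0 = 0 then p else m0
    if m ≤ b then m else pvLoop a b k

def MaximumExpo_alt (a : Int) (b : Int) : Int :=
  pvLoop a b (PySem.Int.bitLength (max |a| |b|))

-- ===== PRECONDITION & SPEC =====
def Spec_MaximumExpo (a : Int) (b : Int) (out : Int) : Prop := out = MaximumExpo_alt a b
instance (a : Int) (b : Int) (out : Int) : Decidable (Spec_MaximumExpo a b out) := by unfold Spec_MaximumExpo; infer_instance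

-- ===== CLAIM (what is proved, stated in full; the proofs are below) =====
def Claim_equal_MaximumExpo : Prop := ∀ (a : Int) (b : Int), Dom_MaximumExpo a b → Spec_MaximumExpo a b (MaximumExpo a b)

-- ===== LEMMAS AND PROOFS =====

theorem countExpo_nonneg (i : Int) : 0 ≤ countExpo i := by
  fun_induction countExpo i with
  | _ => omega

theorem countExpo_zero : countExpo 0 = 0 := by
  rw [countExpo]; simp

theorem floordiv_two_of_even (i : Int) (h2 : i % 2 = 0) :
    i = 2 * PySem.Int.floordiv i 2 := by
  rw [PySem.Int.floordiv_eq_ediv_of_pos (by norm_num : (0:Int) < 2)]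
  omega

theorem countExpo_dvd (i : Int) : (2:Int) ^ (countExpo i).toNat ∣ i := by
  fun_induction countExpo i with
  | case1 i h ih =>
    have h2 := h.2
    rw [PySem.Int.mod_eq_emod_of_pos (by norm_num : (0:Int) < 2)] at h2
    have hnn := countExpo_nonneg (PySem.Int.floordiv i 2)
    have ht : (1 + countExpo (PySem.Int.floordiv i 2)).toNat
        = (countExpo (PySem.Int.floordiv i 2)).toNat + 1 := by omega
    rw [ht, pow_succ']
    calc (2:Int) * 2 ^ (countExpo (PySem.Int.floordiv i 2)).toNat
        ∣ 2 * PySem.Int.floordiv i 2 := mul_dvd_mul_left 2 ih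
      _ = i := (floordiv_two_of_even i h2).symm
  | case2 i h => simp

theorem countExpo_max (i : Int) (hi : i ≠ 0) :
    ¬ ((2:Int) ^ ((countExpo i).toNat + 1) ∣ i) := by
  fun_induction countExpo i with
  | case1 i h ih =>
    have h2 := h.2
    rw [PySem.Int.mod_eq_emod_of_pos (by norm_num : (0:Int) < 2)] at h2
    have heq := floordiv_two_of_even i h2
    have hhalf : PySem.Int.floordiv i 2 ≠ 0 := by
      intro h0; rw [h0] at heq; omega
    have hnn := countExpo_nonneg (PySem.Int.floordiv i 2)
    have ht : (1 + countExpo (PySem.Int.floordiv i 2)).toNat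
        = (countExpo (PySem.Int.floordiv i 2)).toNat + 1 := by omega
    rw [ht]
    intro hdvd
    apply ih hhalf
    have h2d : (2:Int) * 2 ^ ((countExpo (PySem.Int.floordiv i 2)).toNat + 1)
        ∣ 2 * PySem.Int.floordiv i 2 := by
      rw [← floordiv_two_of_even i h2, ← pow_succ']
      exact hdvd
    exact (mul_dvd_mul_iff_left (by norm_num : (2:Int) ≠ 0)).mp h2d
  | case2 i h =>
    have h2 : ¬ PySem.Int.mod i 2 = 0 := by tauto
    rw [PySem.Int.mod_eq_zero_iff_dvd] at h2
    intro hdvd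
    exact h2 (dvd_trans (by simp : (2:Int) ∣ 2 ^ ((0:Int).toNat + 1)) hdvd)

theorem countExpo_ge_iff (i : Int) (hi : i ≠ 0) (k : Nat) :
    (k : Int) ≤ countExpo i ↔ (2:Int) ^ k ∣ i := by
  constructor
  · intro hle
    exact dvd_trans (pow_dvd_pow 2 (by omega : k ≤ (countExpo i).toNat)) (countExpo_dvd i)
  · intro hdvd
    by_contra hlt
    have hnn := countExpo_nonneg i
    have : (countExpo i).toNat + 1 ≤ k := by omega
    exact countExpo_max i hi (dvd_trans (pow_dvd_pow 2 this) hdvd)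

theorem fold_keep (L : List Int) (st : Int × Int)
    (h : ∀ i ∈ L, countExpo i ≤ st.1) :
    L.foldl (fun (st : Int × Int) i =>
      let temp := countExpo i
      if temp > st.1 then (temp, i) else st) st = st := by
  induction L with
  | nil => rfl
  | cons x xs ih =>
    have hx : ¬ countExpo x > st.1 := by
      have := h x (by simp); omega
    simp only [List.foldl_cons, if_neg hx]
    exact ih (fun i hi => h i (by simp [hi]))

theorem fold_fst_lt (L : List Int) (st : Int × Int) (K : Int) (hst : st.1 < K)
    (h : ∀ i ∈ L, countExpo i < K) :
    (L.foldl (fun (st : Int × Int) i =>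
      let temp := countExpo i
      if temp > st.1 then (temp, i) else st) st).1 < K := by
  induction L generalizing st with
  | nil => exact hst
  | cons x xs ih =>
    simp only [List.foldl_cons]
    by_cases hx : countExpo x > st.1
    · simp only [if_pos hx]
      exact ih (countExpo x, x) (h x (by simp)) (fun i hi => h i (by simp [hi]))
    · simp only [if_neg hx]
      exact ih st hst (fun i hi => h i (by simp [hi]))

-- the main downward-loop invariant: if every nonzero element of [a,b] has at most k
-- factors of two, A's fold and B's loop from k agree
theorem loop_eq (a b : Int) (k : Nat)
    (hk : ∀ i : Int, a ≤ i → i ≤ b → i ≠ 0 → countExpo i ≤ (k : Int)) :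
    MaximumExpo a b = pvLoop a b k := by
  induction k with
  | zero =>
    rw [MaximumExpo, pvLoop, fold_keep]
    intro i hi
    rw [PySem.List.mem_pyRange_one] at hi
    by_cases hz : i = 0
    · subst hz; rw [countExpo_zero]
    · simpa using hk i hi.1 (by omega) hz
  | succ k ih =>
    set p : Int := 2 ^ (k + 1) with hpdef
    have hp : (0:Int) < p := by positivity
    set q : Int := -(PySem.Int.floordiv (-a) p) with hqdef
    have hceil : (q - 1) * p < a ∧ a ≤ q * p :=
      (PySem.Int.neg_floordiv_neg_eq_iff_of_pos hp).mp rfl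
    set m : Int := if q * p = 0 then p else q * p with hmdef
    have ham : a ≤ m := by
      by_cases h0 : q * p = 0
      · rw [hmdef, if_pos h0]; omega
      · rw [hmdef, if_neg h0]; exact hceil.2
    have hmne : m ≠ 0 := by
      by_cases h0 : q * p = 0
      · rw [hmdef, if_pos h0]; omega
      · rw [hmdef, if_neg h0]; exact h0
    have hdvd : p ∣ m := by
      by_cases h0 : q * p = 0
      · rw [hmdef, if_pos h0]
      · rw [hmdef, if_neg h0]; exact Dvd.intro_left q rfl
    have hmin : ∀ i : Int, a ≤ i → i ≠ 0 → p ∣ i → m ≤ i := by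
      intro i hai hine hpi
      obtain ⟨t, rfl⟩ := hpi
      have hqt : q ≤ t := by
        by_contra hlt
        have ht1 : t ≤ q - 1 := by omega
        have : p * t ≤ (q - 1) * p := by nlinarith
        omega
      have hqp : q * p ≤ p * t := by nlinarith
      by_cases h0 : q * p = 0
      · have hq0 : q = 0 := by
          rcases mul_eq_zero.mp h0 with h | h
          · exact h
          · omega
        have ht0 : t ≠ 0 := by intro h; rw [h] at hine; simp at hine
        have : 1 ≤ t := by omega
        rw [hmdef, if_pos h0]
        nlinarith
      · rw [hmdef, if_neg h0]; exact hqp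
    have hloop : pvLoop a b (k+1) = if m ≤ b then m else pvLoop a b k := by
      rw [pvLoop]
    rw [hloop]
    by_cases hmb : m ≤ b
    · rw [if_pos hmb]
      have hcem : countExpo m = (k:Int) + 1 := by
        have hge : ((k+1 : Nat) : Int) ≤ countExpo m :=
          (countExpo_ge_iff m hmne (k+1)).mpr hdvd
        have hle := hk m ham hmb hmne
        push_cast at hge hle ⊢
        omega
      have hsplit : PySem.List.pyRange a (b+1) 1
          = PySem.List.pyRange a m 1 ++ m :: PySem.List.pyRange (m+1) (b+1) 1 := by
        rw [PySem.List.pyRange_one_append a m (b+1) ham (by omega),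
            PySem.List.pyRange_one_cons (by omega : m < b + 1)]
      rw [MaximumExpo, hsplit, List.foldl_append]
      have h1 : ((PySem.List.pyRange a m 1).foldl
          (fun (st : Int × Int) i =>
            let temp := countExpo i
            if temp > st.1 then (temp, i) else st) ((0:Int), (0:Int))).1 < (k:Int) + 1 := by
        apply fold_fst_lt _ _ _ (by show (0:Int) < (k:Int) + 1; omega)
        intro i hi
        rw [PySem.List.mem_pyRange_one] at hi
        by_cases hz : i = 0
        · subst hz; rw [countExpo_zero]; omega
        · have hub := hk i hi.1 (by omega) hz
          push_cast at hub
          by_cases hge : ((k+1 : Nat) : Int) ≤ countExpo i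
          · exfalso
            have := hmin i hi.1 hz ((countExpo_ge_iff i hz (k+1)).mp hge)
            omega
          · push_cast at hge; omega
      simp only [List.foldl_cons]
      rw [if_pos (by simpa [hcem] using h1), fold_keep]
      intro i hi
      rw [PySem.List.mem_pyRange_one] at hi
      by_cases hz : i = 0
      · rw [hz, countExpo_zero]
        exact countExpo_nonneg m
      · have := hk i (by omega) (by omega) hz
        push_cast at this
        show countExpo i ≤ countExpo m
        rw [hcem]; omega
    · rw [if_neg hmb]
      apply ih
      intro i hai hib hine
      have hub := hk i hai hib hine
      push_cast at hub
      by_cases hge : ((k+1 : Nat) : Int) ≤ countExpo i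
      · exfalso
        exact hmb (le_trans (hmin i hai hine ((countExpo_ge_iff i hine (k+1)).mp hge)) hib)
      · push_cast at hge; omega

theorem bound_kmax (a b i : Int) (ha : a ≤ i) (hb : i ≤ b) (hi : i ≠ 0) :
    countExpo i ≤ (PySem.Int.bitLength (max |a| |b|) : Int) := by
  set c := (countExpo i).toNat with hcdef
  have hdvd : (2:Int) ^ c ∣ i := countExpo_dvd i
  have hle : 2 ^ c ≤ i.natAbs := by
    have := Int.natAbs_dvd_natAbs.mpr hdvd
    simpa using Nat.le_of_dvd (by omega) this
  have hmaxeq : (max |a| |b|).natAbs = max a.natAbs b.natAbs := by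
    rw [Int.abs_eq_natAbs, Int.abs_eq_natAbs, ← Nat.cast_max, Int.natAbs_natCast]
  have habs : i.natAbs ≤ (max |a| |b|).natAbs := by rw [hmaxeq]; omega
  have hlt : (max |a| |b|).natAbs < 2 ^ PySem.Int.bitLength (max |a| |b|) :=
    PySem.Int.lt_two_pow_bitLength _
  have hcle : c < PySem.Int.bitLength (max |a| |b|) := by
    have h2 : 2 ^ c < 2 ^ PySem.Int.bitLength (max |a| |b|) := by omega
    exact (Nat.pow_lt_pow_iff_right (by norm_num)).mp h2
  have := countExpo_nonneg i
  omega

-- ===== VERDICT (by name: the statement is the Claim_ definition above) =====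
theorem MaximumExpo_spec : Claim_equal_MaximumExpo := by
  intro a b _
  unfold Spec_MaximumExpo MaximumExpo_alt
  exact loop_eq a b _ (fun i hai hib hi => bound_kmax a b i hai hib hi)
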